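-- pv_equiv track=rewrite | github.com/HydroFrame-ML/hydrogen-emulator-1ts | emulator-1ts/experiment_tracking.py | _format_hyperparameters_text
-- ===== SOURCE A (Python) =====
-- from typing import Dict, Any, Optional, List, Union
--
-- def _format_hyperparameters_text(hparams: Dict[str, Any]) -> str:
--     """Format hyperparameters as readable text."""
--     lines = ["# Experiment Configuration\n"]
--
--     # Group parameters by category
--     categories = {
--         'Model': [],
--         'Training': [],
--         'Data': [],
--         'Callbacks': [],
--         'TensorBoard': [],
--         'Derived': [],
--         'Other': []
--     }
--
--     for key, value in sorted(hparams.items()):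
--         if any(x in key.lower() for x in ['model', 'channel', 'hidden', 'depth', 'kernel']):
--             categories['Model'].append(f"- **{key}**: {value}")
--         elif any(x in key.lower() for x in ['lr', 'batch', 'epoch', 'optimizer', 'loss']):
--             categories['Training'].append(f"- **{key}**: {value}")
--         elif any(x in key.lower() for x in ['data', 'patch', 'parameter', 'evaptrans']):
--             categories['Data'].append(f"- **{key}**: {value}")
--         elif any(x in key.lower() for x in ['callback', 'early', 'scheduler', 'gradient']):
--             categories['Callbacks'].append(f"- **{key}**: {value}")
--         elif 'tensorboard' in key.lower():
--             categories['TensorBoard'].append(f"- **{key}**: {value}")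
--         elif any(x in key.lower() for x in ['estimated', 'complexity', 'ratio', 'enabled_callbacks']):
--             categories['Derived'].append(f"- **{key}**: {value}")
--         else:
--             categories['Other'].append(f"- **{key}**: {value}")
--
--     # Format each category
--     for category, items in categories.items():
--         if items:
--             lines.append(f"\n## {category}\n")
--             lines.extend(items)
--
--     return '\n'.join(lines)
-- ===== SOURCE B (Python) =====
-- RULES = [
--     ('Model', ['model', 'channel', 'hidden', 'depth', 'kernel']),
--     ('Training', ['lr', 'batch', 'epoch', 'optimizer', 'loss']),
--     ('Data', ['data', 'patch', 'parameter', 'evaptrans']),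
--     ('Callbacks', ['callback', 'early', 'scheduler', 'gradient']),
--     ('TensorBoard', ['tensorboard']),
--     ('Derived', ['estimated', 'complexity', 'ratio', 'enabled_callbacks']),
-- ]
--
--
-- def _category_of(key):
--     low = key.lower()
--     return next((cat for cat, kws in RULES if any(kw in low for kw in kws)), 'Other')
--
--
-- def _format_hyperparameters_text(hparams):
--     """Format hyperparameters as readable text."""
--     items = sorted(hparams.items())
--     parts = ["# Experiment Configuration\n"]
--     for cat in [c for c, _ in RULES] + ['Other']:
--         block = [f"- **{k}**: {v}" for k, v in items if _category_of(k) == cat]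
--         if block:
--             parts.append(f"\n## {cat}\n")
--             parts.extend(block)
--     return '\n'.join(parts)
-- ===== Notes on version B (the rewrite author's own statement) =====
-- stated objective: idiomatic
-- what changed: Replaces the if/elif keyword cascade and seven mutable accumulator lists with a data-driven rules table (first-matching-rule lookup) and one filter pass per display category, so classification logic and output order live in one declarative list.
import Mathlib
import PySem

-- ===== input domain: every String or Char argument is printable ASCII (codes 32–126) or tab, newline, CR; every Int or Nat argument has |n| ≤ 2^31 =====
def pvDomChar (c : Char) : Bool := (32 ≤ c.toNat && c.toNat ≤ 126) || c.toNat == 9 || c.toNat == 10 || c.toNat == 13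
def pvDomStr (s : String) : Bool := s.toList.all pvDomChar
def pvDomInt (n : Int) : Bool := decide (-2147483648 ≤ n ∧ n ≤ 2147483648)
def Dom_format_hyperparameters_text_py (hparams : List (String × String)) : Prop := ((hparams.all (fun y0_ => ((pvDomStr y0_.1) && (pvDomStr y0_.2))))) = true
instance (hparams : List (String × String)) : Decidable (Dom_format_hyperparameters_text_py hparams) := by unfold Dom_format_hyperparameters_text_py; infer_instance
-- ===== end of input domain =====

-- B replaces A's if/elif keyword cascade with seven accumulator lists by a data-driven rules
-- table (first matching rule) and one filter pass per category (idiomatic; same output).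

-- ===== PORT A =====
structure PvCats where
  model : List String
  training : List String
  data : List String
  callbacks : List String
  tensorboard : List String
  derived : List String
  other : List String
deriving Repr, DecidableEq

-- the body of A's 'for key, value in sorted(hparams.items())' loop
def pvStepA (c : PvCats) (kv : String × String) : PvCats :=
  let low := PySem.Str.lower kv.1
  let line := "- **" ++ kv.1 ++ "**: " ++ kv.2
  if ["model", "channel", "hidden", "depth", "kernel"].any (fun x => PySem.Str.isIn x low) then
    { c with model := c.model ++ [line] }
  else if ["lr", "batch", "epoch", "optimizer", "loss"].any (fun x => PySem.Str.isIn x low) then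
    { c with training := c.training ++ [line] }
  else if ["data", "patch", "parameter", "evaptrans"].any (fun x => PySem.Str.isIn x low) then
    { c with data := c.data ++ [line] }
  else if ["callback", "early", "scheduler", "gradient"].any (fun x => PySem.Str.isIn x low) then
    { c with callbacks := c.callbacks ++ [line] }
  else if PySem.Str.isIn "tensorboard" low then
    { c with tensorboard := c.tensorboard ++ [line] }
  else if ["estimated", "complexity", "ratio", "enabled_callbacks"].any (fun x => PySem.Str.isIn x low) then
    { c with derived := c.derived ++ [line] }
  else
    { c with other := c.other ++ [line] }

def format_hyperparameters_text_py (hparams : List (String × String)) : String :=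
  -- categories = dict of 7 empty lists; loop over sorted(hparams.items())
  let c := (PySem.List.sorted2 hparams (fun kv => kv.1) (fun kv => kv.2)).foldl pvStepA
    ⟨[], [], [], [], [], [], []⟩
  -- for category, items in categories.items(): if items: append header, extend items
  let lines := ["# Experiment Configuration\n"]
  let lines := if c.model ≠ [] then lines ++ ["\n## Model\n"] ++ c.model else lines
  let lines := if c.training ≠ [] then lines ++ ["\n## Training\n"] ++ c.training else lines
  let lines := if c.data ≠ [] then lines ++ ["\n## Data\n"] ++ c.data else lines
  let lines := if c.callbacks ≠ [] then lines ++ ["\n## Callbacks\n"] ++ c.callbacks else lines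
  let lines := if c.tensorboard ≠ [] then lines ++ ["\n## TensorBoard\n"] ++ c.tensorboard else lines
  let lines := if c.derived ≠ [] then lines ++ ["\n## Derived\n"] ++ c.derived else lines
  let lines := if c.other ≠ [] then lines ++ ["\n## Other\n"] ++ c.other else lines
  PySem.Str.join "\n" lines

-- ===== PORT B =====
def pvRules : List (String × List String) :=
  [("Model", ["model", "channel", "hidden", "depth", "kernel"]),
   ("Training", ["lr", "batch", "epoch", "optimizer", "loss"]),
   ("Data", ["data", "patch", "parameter", "evaptrans"]),
   ("Callbacks", ["callback", "early", "scheduler", "gradient"]),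
   ("TensorBoard", ["tensorboard"]),
   ("Derived", ["estimated", "complexity", "ratio", "enabled_callbacks"])]

def pvCategoryOf (key : String) : String :=
  let low := PySem.Str.lower key
  match pvRules.find? (fun r => r.2.any (fun kw => PySem.Str.isIn kw low)) with
  | some r => r.1
  | none => "Other"

def format_hyperparameters_text_py_alt (hparams : List (String × String)) : String :=
  let items := PySem.List.sorted2 hparams (fun kv => kv.1) (fun kv => kv.2)
  let parts := (pvRules.map (fun r => r.1) ++ ["Other"]).foldl
    (fun (parts : List String) cat =>
      let block := (items.filter (fun kv => pvCategoryOf kv.1 == cat)).map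
        (fun kv => "- **" ++ kv.1 ++ "**: " ++ kv.2)
      if block ≠ [] then parts ++ ["\n## " ++ cat ++ "\n"] ++ block else parts)
    ["# Experiment Configuration\n"]
  PySem.Str.join "\n" parts

-- ===== PRECONDITION & SPEC =====
def Spec_format_hyperparameters_text_py (hparams : List (String × String)) (out : String) : Prop := out = format_hyperparameters_text_py_alt hparams
instance (hparams : List (String × String)) (out : String) : Decidable (Spec_format_hyperparameters_text_py hparams out) := by unfold Spec_format_hyperparameters_text_py; infer_instance

-- ===== CLAIM (what is proved, stated in full; the proofs are below) =====
def Claim_equal_format_hyperparameters_text_py : Prop := ∀ (hparams : List (String × String)), Dom_format_hyperparameters_text_py hparams → Spec_format_hyperparameters_text_py hparams (format_hyperparameters_text_py hparams)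

-- ===== LEMMAS AND PROOFS =====

-- B's per-category block over a list of items (the list B maps-and-filters for one category)
def pvBlk (cat : String) (l : List (String × String)) : List String :=
  (l.filter (fun kv => pvCategoryOf kv.1 == cat)).map
    (fun kv => "- **" ++ kv.1 ++ "**: " ++ kv.2)

-- B's first-matching-rule lookup, pinned branch by branch to A's elif chain of keyword tests
theorem pv_cat1 (key : String)
    (h1 : (["model", "channel", "hidden", "depth", "kernel"].any (fun x => PySem.Str.isIn x (PySem.Str.lower key))) = true) :
    pvCategoryOf key = "Model" := by
  simp only [pvCategoryOf, pvRules]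
  rw [List.find?_cons_of_pos (by exact h1)]

theorem pv_cat2 (key : String)
    (h1 : ¬(["model", "channel", "hidden", "depth", "kernel"].any (fun x => PySem.Str.isIn x (PySem.Str.lower key))) = true)
    (h2 : (["lr", "batch", "epoch", "optimizer", "loss"].any (fun x => PySem.Str.isIn x (PySem.Str.lower key))) = true) :
    pvCategoryOf key = "Training" := by
  simp only [pvCategoryOf, pvRules]
  rw [List.find?_cons_of_neg (by simpa using h1), List.find?_cons_of_pos (by exact h2)]

theorem pv_cat3 (key : String)
    (h1 : ¬(["model", "channel", "hidden", "depth", "kernel"].any (fun x => PySem.Str.isIn x (PySem.Str.lower key))) = true)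
    (h2 : ¬(["lr", "batch", "epoch", "optimizer", "loss"].any (fun x => PySem.Str.isIn x (PySem.Str.lower key))) = true)
    (h3 : (["data", "patch", "parameter", "evaptrans"].any (fun x => PySem.Str.isIn x (PySem.Str.lower key))) = true) :
    pvCategoryOf key = "Data" := by
  simp only [pvCategoryOf, pvRules]
  rw [List.find?_cons_of_neg (by simpa using h1), List.find?_cons_of_neg (by simpa using h2),
    List.find?_cons_of_pos (by exact h3)]

theorem pv_cat4 (key : String)
    (h1 : ¬(["model", "channel", "hidden", "depth", "kernel"].any (fun x => PySem.Str.isIn x (PySem.Str.lower key))) = true)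
    (h2 : ¬(["lr", "batch", "epoch", "optimizer", "loss"].any (fun x => PySem.Str.isIn x (PySem.Str.lower key))) = true)
    (h3 : ¬(["data", "patch", "parameter", "evaptrans"].any (fun x => PySem.Str.isIn x (PySem.Str.lower key))) = true)
    (h4 : (["callback", "early", "scheduler", "gradient"].any (fun x => PySem.Str.isIn x (PySem.Str.lower key))) = true) :
    pvCategoryOf key = "Callbacks" := by
  simp only [pvCategoryOf, pvRules]
  rw [List.find?_cons_of_neg (by simpa using h1), List.find?_cons_of_neg (by simpa using h2),
    List.find?_cons_of_neg (by simpa using h3), List.find?_cons_of_pos (by exact h4)]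

theorem pv_cat5 (key : String)
    (h1 : ¬(["model", "channel", "hidden", "depth", "kernel"].any (fun x => PySem.Str.isIn x (PySem.Str.lower key))) = true)
    (h2 : ¬(["lr", "batch", "epoch", "optimizer", "loss"].any (fun x => PySem.Str.isIn x (PySem.Str.lower key))) = true)
    (h3 : ¬(["data", "patch", "parameter", "evaptrans"].any (fun x => PySem.Str.isIn x (PySem.Str.lower key))) = true)
    (h4 : ¬(["callback", "early", "scheduler", "gradient"].any (fun x => PySem.Str.isIn x (PySem.Str.lower key))) = true)
    (h5 : PySem.Str.isIn "tensorboard" (PySem.Str.lower key) = true) :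
    pvCategoryOf key = "TensorBoard" := by
  simp only [pvCategoryOf, pvRules]
  rw [List.find?_cons_of_neg (by simpa using h1), List.find?_cons_of_neg (by simpa using h2),
    List.find?_cons_of_neg (by simpa using h3), List.find?_cons_of_neg (by simpa using h4),
    List.find?_cons_of_pos (by simpa using h5)]

theorem pv_cat6 (key : String)
    (h1 : ¬(["model", "channel", "hidden", "depth", "kernel"].any (fun x => PySem.Str.isIn x (PySem.Str.lower key))) = true)
    (h2 : ¬(["lr", "batch", "epoch", "optimizer", "loss"].any (fun x => PySem.Str.isIn x (PySem.Str.lower key))) = true)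
    (h3 : ¬(["data", "patch", "parameter", "evaptrans"].any (fun x => PySem.Str.isIn x (PySem.Str.lower key))) = true)
    (h4 : ¬(["callback", "early", "scheduler", "gradient"].any (fun x => PySem.Str.isIn x (PySem.Str.lower key))) = true)
    (h5 : ¬PySem.Str.isIn "tensorboard" (PySem.Str.lower key) = true)
    (h6 : (["estimated", "complexity", "ratio", "enabled_callbacks"].any (fun x => PySem.Str.isIn x (PySem.Str.lower key))) = true) :
    pvCategoryOf key = "Derived" := by
  simp only [pvCategoryOf, pvRules]
  rw [List.find?_cons_of_neg (by simpa using h1), List.find?_cons_of_neg (by simpa using h2),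
    List.find?_cons_of_neg (by simpa using h3), List.find?_cons_of_neg (by simpa using h4),
    List.find?_cons_of_neg (by simpa using h5), List.find?_cons_of_pos (by exact h6)]

theorem pv_cat7 (key : String)
    (h1 : ¬(["model", "channel", "hidden", "depth", "kernel"].any (fun x => PySem.Str.isIn x (PySem.Str.lower key))) = true)
    (h2 : ¬(["lr", "batch", "epoch", "optimizer", "loss"].any (fun x => PySem.Str.isIn x (PySem.Str.lower key))) = true)
    (h3 : ¬(["data", "patch", "parameter", "evaptrans"].any (fun x => PySem.Str.isIn x (PySem.Str.lower key))) = true)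
    (h4 : ¬(["callback", "early", "scheduler", "gradient"].any (fun x => PySem.Str.isIn x (PySem.Str.lower key))) = true)
    (h5 : ¬PySem.Str.isIn "tensorboard" (PySem.Str.lower key) = true)
    (h6 : ¬(["estimated", "complexity", "ratio", "enabled_callbacks"].any (fun x => PySem.Str.isIn x (PySem.Str.lower key))) = true) :
    pvCategoryOf key = "Other" := by
  simp only [pvCategoryOf, pvRules]
  rw [List.find?_cons_of_neg (by simpa using h1), List.find?_cons_of_neg (by simpa using h2),
    List.find?_cons_of_neg (by simpa using h3), List.find?_cons_of_neg (by simpa using h4),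
    List.find?_cons_of_neg (by simpa using h5), List.find?_cons_of_neg (by simpa using h6)]
  rfl

theorem pv_fold_spec (l : List (String × String)) (c : PvCats) :
    l.foldl pvStepA c =
      ⟨c.model ++ pvBlk "Model" l, c.training ++ pvBlk "Training" l,
       c.data ++ pvBlk "Data" l, c.callbacks ++ pvBlk "Callbacks" l,
       c.tensorboard ++ pvBlk "TensorBoard" l, c.derived ++ pvBlk "Derived" l,
       c.other ++ pvBlk "Other" l⟩ := by
  induction l generalizing c with
  | nil => simp [pvBlk]
  | cons kv t ih =>
    rw [List.foldl_cons]
    simp only [pvStepA]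
    split_ifs with h1 h2 h3 h4 h5 h6 <;> rw [ih]
    · simp [pvBlk, pv_cat1 kv.1 h1]
    · simp [pvBlk, pv_cat2 kv.1 h1 h2]
    · simp [pvBlk, pv_cat3 kv.1 h1 h2 h3]
    · simp [pvBlk, pv_cat4 kv.1 h1 h2 h3 h4]
    · simp [pvBlk, pv_cat5 kv.1 h1 h2 h3 h4 h5]
    · simp [pvBlk, pv_cat6 kv.1 h1 h2 h3 h4 h5 h6]
    · simp [pvBlk, pv_cat7 kv.1 h1 h2 h3 h4 h5 h6]

-- ===== VERDICT (by name: the statement is the Claim_ definition above) =====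
theorem format_hyperparameters_text_py_spec : Claim_equal_format_hyperparameters_text_py := by
  intro hparams _
  unfold Spec_format_hyperparameters_text_py format_hyperparameters_text_py format_hyperparameters_text_py_alt
  rw [pv_fold_spec]
  simp only [pvRules, List.map]
  rfl
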